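-- pv_equiv track=rewrite | github.com/MrHamdulay/csc3-capstone | examples/data/Assignment_8/jgrdiv001/question2.py | Pcount
-- ===== SOURCE A (Python) =====
-- def Pcount(string):
--     if len(string) == 0:      #base case
--         return 0
--     else:
--        #to get the first characters
--
--         if string[0:1] == string[1:2]: #to check if the first characters are equal
--             return 1 + Pcount(string[2:])# counts the pairs with the recursive step
--         else:
--             return Pcount(string[1:])
-- ===== SOURCE B (Python) =====
-- def Pcount(string):
--     count = 0
--     i = 0
--     n = len(string)
--     while i + 1 < n:
--         if string[i] == string[i + 1]:
--             count += 1
--             i += 2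
--         else:
--             i += 1
--     return count
-- ===== Notes on version B (the rewrite author's own statement) =====
-- stated objective: faster
-- what changed: Replaced the slice-building recursion (each step copies the remaining string) with a single iterative index pointer that advances 2 on a match and 1 otherwise, with an integer counter.
import Mathlib
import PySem

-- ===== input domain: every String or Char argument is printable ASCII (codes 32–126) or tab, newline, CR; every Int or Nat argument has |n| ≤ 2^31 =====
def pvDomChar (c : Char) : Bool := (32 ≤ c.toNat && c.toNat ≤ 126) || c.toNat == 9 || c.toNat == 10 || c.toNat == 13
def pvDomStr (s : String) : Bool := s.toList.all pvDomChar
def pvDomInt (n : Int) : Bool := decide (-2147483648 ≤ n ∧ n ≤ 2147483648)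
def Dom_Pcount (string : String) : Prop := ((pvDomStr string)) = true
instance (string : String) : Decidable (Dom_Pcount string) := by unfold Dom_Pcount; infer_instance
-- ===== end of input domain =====

-- B rewrites A's slice-copying recursion as one iterative index pointer (advance 2 on match, else 1); return value only.

-- ===== PORT A =====
-- A recurses on slices: s[0:1] == s[1:2] holds exactly when the list starts with two
-- equal characters (on a one-element or empty list the slices differ resp. are both empty);
-- the structural recursion below is that slice comparison written over List Char.
def PcountChars : List Char → Int
  | [] => 0
  | [_] => PcountChars []
  | a :: b :: tail => if a == b then 1 + PcountChars tail else PcountChars (b :: tail)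

def Pcount (string : String) : Int := PcountChars string.toList

-- ===== PORT B =====
-- B's while loop: index i, counter count; while i+1 < n.
def PcountAltLoop (s : List Char) (i : Nat) (count : Int) : Int :=
  if h : i + 1 < s.length then
    if s[i]'(by omega) == s[i + 1]'h then PcountAltLoop s (i + 2) (count + 1)
    else PcountAltLoop s (i + 1) count
  else count
termination_by s.length - i

def Pcount_alt (string : String) : Int := PcountAltLoop string.toList 0 0

-- ===== PRECONDITION & SPEC =====
def Spec_Pcount (string : String) (out : Int) : Prop := out = Pcount_alt string
instance (string : String) (out : Int) : Decidable (Spec_Pcount string out) := by unfold Spec_Pcount; infer_instance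

-- ===== CLAIM (what is proved, stated in full; the proofs are below) =====
def Claim_equal_Pcount : Prop := ∀ (string : String), Dom_Pcount string → Spec_Pcount string (Pcount string)

-- ===== LEMMAS AND PROOFS =====

-- loop invariant: the loop from index i computes count + A's recursion on the i-th suffix
theorem PcountAltLoop_eq (s : List Char) (i : Nat) (count : Int) :
    PcountAltLoop s i count = count + PcountChars (s.drop i) := by
  suffices H : ∀ n i (count : Int), s.length - i ≤ n →
      PcountAltLoop s i count = count + PcountChars (s.drop i) by
    exact H (s.length - i) i count le_rfl
  intro n
  induction n with
  | zero =>
    intro i count hle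
    have hlen : s.length ≤ i := by omega
    rw [PcountAltLoop]
    rw [dif_neg (by omega), List.drop_eq_nil_of_le hlen]
    simp [PcountChars]
  | succ n ih =>
    intro i count hle
    rw [PcountAltLoop]
    by_cases h : i + 1 < s.length
    · have hd : s.drop i = s[i]'(by omega) :: s.drop (i + 1) :=
        List.drop_eq_getElem_cons (by omega)
      have hd2 : s.drop (i + 1) = s[i + 1]'h :: s.drop (i + 2) :=
        List.drop_eq_getElem_cons h
      rw [dif_pos h]
      by_cases he : s[i]'(by omega) == s[i + 1]'h
      · rw [if_pos he, ih (i + 2) (count + 1) (by omega), hd, hd2, PcountChars, if_pos he]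
        ring
      · rw [if_neg he, ih (i + 1) count (by omega), hd, hd2, PcountChars, if_neg he, ← hd2]
    · have hc : s.drop i = [] ∨ ∃ a, s.drop i = [a] := by
        rcases hc : s.drop i with _ | ⟨a, _ | _⟩
        · exact Or.inl rfl
        · exact Or.inr ⟨a, rfl⟩
        · exfalso
          have := congrArg List.length hc
          simp [List.length_drop] at this
          omega
      rw [dif_neg h]
      rcases hc with hc | ⟨a, hc⟩ <;> rw [hc] <;> simp [PcountChars]

-- ===== VERDICT (by name: the statement is the Claim_ definition above) =====
theorem Pcount_spec : Claim_equal_Pcount := by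
  intro s _
  unfold Spec_Pcount Pcount Pcount_alt
  rw [PcountAltLoop_eq]
  simp
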